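-- pv_equiv track=rewrite | github.com/linhdvu14/cp-sols | sols/CodeChef/JUNE20B/XYSTR.py | solve
-- ===== SOURCE A (Python) =====
-- def solve(S):
-- 	res = 0
-- 	used = False
-- 	for i in range(1,len(S)):
-- 		if i > 0 and S[i] != S[i-1] and not used:
-- 			res += 1
-- 			used = True
-- 		else:
-- 			used = False
-- 	return res
-- ===== SOURCE B (Python) =====
-- def solve(S):
--     diffs = [S[i] != S[i-1] for i in range(1, len(S))]
--     n = len(diffs)
--     res = 0
--     i = 0
--     while i < n:
--         if not diffs[i]:
--             i += 1
--         else: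
--             j = i + 1
--             while j < n and diffs[j]:
--                 j += 1
--             res += (j - i + 1) // 2
--             i = j
--     return res
-- ===== Notes on version B (the rewrite author's own statement) =====
-- stated objective: alternative
-- what changed: Replaces A's single char-walk with a per-adjacency skip toggle by a staged algorithm: first build the list of adjacent-difference booleans, then group maximal runs of consecutive True entries by index scanning and add (L+1)//2 per run of length L.
import Mathlib
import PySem

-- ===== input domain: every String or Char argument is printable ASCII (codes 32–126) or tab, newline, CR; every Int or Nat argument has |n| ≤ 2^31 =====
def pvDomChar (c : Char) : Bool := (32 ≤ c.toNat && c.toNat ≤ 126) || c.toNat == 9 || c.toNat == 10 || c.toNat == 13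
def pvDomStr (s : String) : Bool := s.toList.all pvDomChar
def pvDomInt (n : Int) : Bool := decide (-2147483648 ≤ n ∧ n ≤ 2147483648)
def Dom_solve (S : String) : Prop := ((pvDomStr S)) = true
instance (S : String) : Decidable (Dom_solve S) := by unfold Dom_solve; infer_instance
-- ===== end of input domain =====

-- B stages the computation: it first builds the list of adjacent-difference booleans,
-- then groups maximal runs of consecutive True entries and adds (L+1)//2 per run,
-- instead of A's single char-walk with a skip toggle (objective: alternative).

-- ===== PORT A =====
-- A's loop over i in range(1,len(S)) comparing S[i] with S[i-1]: structural recursion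
-- carrying the previous character and the same state (res, used).
def solveLoopA : Char → List Char → Int → Bool → Int
  | _, [], res, _ => res
  | prev, c :: rest, res, used =>
    if c ≠ prev ∧ ¬used then solveLoopA c rest (res + 1) true
    else solveLoopA c rest res false

def solve (S : String) : Int :=
  match S.toList with
  | [] => 0
  | c :: rest => solveLoopA c rest 0 false

-- ===== PORT B =====
-- B's first stage: the list [S[i] != S[i-1] for i in range(1,len(S))], built pairwise.
def diffsOf : Char → List Char → List Bool
  | _, [] => []
  | prev, c :: r => (c != prev) :: diffsOf c r

-- B's inner while loop: advance j while j < n and diffs[j].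
def runEnd (diffs : List Bool) (n : Nat) (j : Nat) : Nat :=
  if j < n ∧ diffs.getD j false then runEnd diffs n (j + 1) else j
termination_by n - j
decreasing_by omega

-- needed only for outerB's termination (the outer index strictly increases)
theorem runEnd_ge (diffs : List Bool) (n j : Nat) : j ≤ runEnd diffs n j := by
  rw [runEnd]
  split
  · exact Nat.le_trans (Nat.le_succ j) (runEnd_ge diffs n (j + 1))
  · exact Nat.le_refl j
termination_by n - j
decreasing_by omega

-- B's outer while loop over the index i, accumulating res.
def outerB (diffs : List Bool) (n : Nat) (i : Nat) (res : Int) : Int :=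
  if i < n then
    if diffs.getD i false = false then outerB diffs n (i + 1) res
    else
      let j := runEnd diffs n (i + 1)
      outerB diffs n j (res + (((j - i + 1) / 2 : Nat) : Int))
  else res
termination_by n - i
decreasing_by
  · omega
  · have := runEnd_ge diffs n (i + 1); omega

def solve_alt (S : String) : Int :=
  match S.toList with
  | [] => 0
  | c :: rest =>
    let diffs := diffsOf c rest
    outerB diffs diffs.length 0 0

-- ===== PRECONDITION & SPEC =====
def Spec_solve (S : String) (out : Int) : Prop := out = solve_alt S
instance (S : String) (out : Int) : Decidable (Spec_solve S out) := by unfold Spec_solve; infer_instance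

-- ===== CLAIM (what is proved, stated in full; the proofs are below) =====
def Claim_equal_solve : Prop := ∀ (S : String), Dom_solve S → Spec_solve S (solve S)

-- ===== LEMMAS AND PROOFS =====

-- A's loop restated over the boolean adjacency list (proof device).
def countA : List Bool → Bool → Int
  | [], _ => 0
  | d :: r, used => if d && !used then 1 + countA r true else countA r false

theorem solveLoopA_eq (l : List Char) : ∀ (prev : Char) (res : Int) (used : Bool),
    solveLoopA prev l res used = res + countA (diffsOf prev l) used := by
  induction l with
  | nil => intro prev res used; simp [solveLoopA, diffsOf, countA]
  | cons c rest ih =>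
    intro prev res used
    by_cases h : c = prev
    · subst h
      simp [solveLoopA, diffsOf, countA, ih]
    · have hb : (c != prev) = true := by simp [h]
      cases used with
      | false =>
        have h1 : solveLoopA prev (c :: rest) res false = solveLoopA c rest (res + 1) true := by
          simp [solveLoopA, h]
        have h2 : countA (diffsOf prev (c :: rest)) false = 1 + countA (diffsOf c rest) true := by
          simp [diffsOf, countA, hb]
        rw [h1, h2, ih]; ring
      | true =>
        simp [solveLoopA, diffsOf, countA, hb, h, ih]

-- the run algebra: entering a run with 'used' set contributes ceil((L+2)/2) over the run
theorem countA_run : ∀ (r : List Bool),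
    1 + countA r true = ((((r.takeWhile id).length + 2) / 2 : Nat) : Int)
      + countA (r.dropWhile id) false
  | [] => by simp [countA]
  | false :: r' => by simp [countA, List.takeWhile, List.dropWhile]
  | true :: [] => by norm_num [countA, List.takeWhile, List.dropWhile]
  | true :: false :: r'' => by
      simp [countA, List.takeWhile, List.dropWhile]
  | true :: true :: r'' => by
      have ih := countA_run r''
      simp only [countA, Bool.not_true, Bool.and_false, Bool.true_and, Bool.not_false,
        Bool.and_true, if_true, if_false, List.takeWhile, List.dropWhile, id,
        List.length_cons]
      have h2 : ((List.takeWhile id r'').length + 1 + 1 + 2) / 2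
          = ((List.takeWhile id r'').length + 2) / 2 + 1 := by omega
      rw [h2]
      push_cast
      omega

theorem runEnd_eq (diffs : List Bool) (s : Nat) :
    runEnd diffs diffs.length s = s + ((diffs.drop s).takeWhile id).length := by
  rw [runEnd]
  by_cases h : s < diffs.length ∧ diffs.getD s false
  · obtain ⟨hs, hd⟩ := h
    have hget : diffs[s] = true := by
      simpa [List.getD, List.getElem?_eq_getElem hs] using hd
    have hdrop : diffs.drop s = diffs[s] :: diffs.drop (s + 1) :=
      List.drop_eq_getElem_cons hs
    rw [if_pos ⟨hs, hd⟩, runEnd_eq diffs (s + 1), hdrop, hget]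
    simp [List.takeWhile]
    omega
  · rw [if_neg h]
    rcases Nat.lt_or_ge s diffs.length with hs | hs
    · have hd : diffs.getD s false = false := by
        rcases Bool.eq_false_or_eq_true (diffs.getD s false) with h0 | h1
        · exact absurd ⟨hs, h0⟩ h
        · exact h1
      have hget : diffs[s] = false := by
        simpa [List.getD, List.getElem?_eq_getElem hs] using hd
      rw [List.drop_eq_getElem_cons hs, hget]
      simp [List.takeWhile]
    · rw [List.drop_eq_nil_of_le hs]
      simp
termination_by diffs.length - s
decreasing_by omega

theorem outerB_eq (diffs : List Bool) (i : Nat) (res : Int) :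
    outerB diffs diffs.length i res = res + countA (diffs.drop i) false := by
  rw [outerB]
  by_cases hi : i < diffs.length
  · rw [if_pos hi]
    have hdrop : diffs.drop i = diffs[i] :: diffs.drop (i + 1) :=
      List.drop_eq_getElem_cons hi
    have hgetD : diffs.getD i false = diffs[i] := by
      simp [List.getD, List.getElem?_eq_getElem hi]
    cases hg : diffs[i] with
    | false =>
      rw [if_pos (by rw [hgetD, hg]), outerB_eq diffs (i + 1) res, hdrop, hg]
      simp [countA]
    | true =>
      rw [if_neg (by rw [hgetD, hg]; simp)]
      have hj := runEnd_eq diffs (i + 1)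
      set r := diffs.drop (i + 1) with hr
      have hjv : runEnd diffs diffs.length (i + 1) = i + 1 + (r.takeWhile id).length := hj
      rw [outerB_eq diffs (runEnd diffs diffs.length (i + 1)) _]
      rw [hjv]
      have hdropj : diffs.drop (i + 1 + (r.takeWhile id).length) = r.dropWhile id := by
        have key : ∀ l : List Bool, l.drop (l.takeWhile id).length = l.dropWhile id := by
          intro l
          induction l with
          | nil => simp
          | cons b t ih => cases b <;> simp [List.takeWhile, List.dropWhile, ih]
        rw [← List.drop_drop, ← hr, key]
      rw [hdropj, hdrop, hg]
      have hrun := countA_run r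
      have harith : (i + 1 + (r.takeWhile id).length - i + 1) / 2
          = ((r.takeWhile id).length + 2) / 2 := by omega
      rw [harith]
      simp only [countA, Bool.true_and, Bool.not_false, if_pos]
      omega
  · rw [if_neg hi, List.drop_eq_nil_of_le (by omega)]
    simp [countA]
termination_by diffs.length - i
decreasing_by
  · omega
  · have := runEnd_ge diffs diffs.length (i + 1); omega

-- ===== VERDICT (by name: the statement is the Claim_ definition above) =====
theorem solve_spec : Claim_equal_solve := by
  intro S _
  unfold Spec_solve solve solve_alt
  cases h : S.toList with
  | nil => rfl
  | cons c rest =>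
    show solveLoopA c rest 0 false = outerB (diffsOf c rest) (diffsOf c rest).length 0 0
    rw [solveLoopA_eq, outerB_eq]
    simp
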